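-- pv_equiv track=rewrite | github.com/nkosinathil/ai-assistant | keyword_agent/keyword_generator.py | _flatten_and_deduplicate
-- ===== SOURCE A (Python) =====
-- def _flatten_and_deduplicate(categorised: dict) -> list[str]:
--     """Merge all categories into a single deduplicated, normalised list."""
--     seen: set[str] = set()
--     result: list[str] = []
--     for keywords in categorised.values():
--         for kw in keywords:
--             normalised = kw.strip().lower()
--             if normalised and normalised not in seen:
--                 seen.add(normalised)
--                 result.append(kw.strip())
--     return sorted(result, key=str.lower)
-- ===== SOURCE B (Python) =====
-- def _flatten_and_deduplicate(categorised: dict) -> list[str]: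
--     """Merge all categories into a single deduplicated, normalised list."""
--     flat = []
--     for keywords in categorised.values():
--         for kw in keywords:
--             stripped = kw.strip()
--             if stripped:
--                 flat.append(stripped)
--     ordered = sorted(flat, key=str.lower)
--     result = []
--     prev = None
--     for kw in ordered:
--         low = kw.lower()
--         if low != prev:
--             result.append(kw)
--             prev = low
--     return result
-- ===== Notes on version B (the rewrite author's own statement) =====
-- stated objective: alternative
-- what changed: A dedups during the flatten pass with a seen-set and then sorts the survivors; B flattens all non-empty stripped keywords, stably sorts them by lowercase, and removes duplicates in one adjacent-comparison scan over the sorted list, relying on sort stability to keep the first-seen casing.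
import Mathlib
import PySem

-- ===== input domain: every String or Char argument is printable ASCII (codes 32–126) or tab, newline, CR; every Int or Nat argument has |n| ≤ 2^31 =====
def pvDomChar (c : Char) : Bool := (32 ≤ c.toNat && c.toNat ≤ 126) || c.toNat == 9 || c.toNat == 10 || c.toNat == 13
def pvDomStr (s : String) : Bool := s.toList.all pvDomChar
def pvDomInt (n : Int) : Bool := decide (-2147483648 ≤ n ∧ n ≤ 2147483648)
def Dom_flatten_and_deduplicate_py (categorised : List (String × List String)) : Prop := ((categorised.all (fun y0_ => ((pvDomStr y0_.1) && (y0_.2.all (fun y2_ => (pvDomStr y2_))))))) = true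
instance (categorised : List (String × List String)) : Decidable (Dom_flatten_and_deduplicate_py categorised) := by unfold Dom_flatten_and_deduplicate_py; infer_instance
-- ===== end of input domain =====

-- B replaces A's set-membership dedup loop by a stable sort of all stripped keywords followed by a
-- single adjacent-duplicate scan (objective: alternative decomposition; not claimed faster).

-- ===== PORT A =====
def flatten_and_deduplicate_py (categorised : List (String × List String)) : List String :=
  let res := categorised.foldl (fun (st : PySem.Set String × List String) p =>
    p.2.foldl (fun (st : PySem.Set String × List String) kw =>
      let normalised := PySem.Str.lower (PySem.Str.strip kw)
      if (!(normalised == "")) && (!(PySem.Set.contains st.1 normalised)) then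
        (PySem.Set.add st.1 normalised, st.2 ++ [PySem.Str.strip kw])
      else st) st) (PySem.Set.empty, [])
  PySem.List.sorted res.2 (fun s => PySem.Str.lower s) false

-- ===== PORT B =====
def flatten_and_deduplicate_py_alt (categorised : List (String × List String)) : List String :=
  let flat := categorised.foldl (fun (acc : List String) p =>
    p.2.foldl (fun (acc : List String) kw =>
      let stripped := PySem.Str.strip kw
      if !(stripped == "") then acc ++ [stripped] else acc) acc) []
  let ordered := PySem.List.sorted flat (fun s => PySem.Str.lower s) false
  let r := ordered.foldl (fun (st : Option String × List String) kw =>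
    let low := PySem.Str.lower kw
    if some low ≠ st.1 then (some low, st.2 ++ [kw]) else st) (none, [])
  r.2

-- ===== PRECONDITION & SPEC =====
-- Pre_ excludes association lists with duplicate keys: they do not represent a Python dict
-- (the dict argument of A keeps only the last value per key), so nothing is claimed there.
def Pre_flatten_and_deduplicate_py (categorised : List (String × List String)) : Prop :=
  (categorised.map Prod.fst).Nodup
instance (categorised : List (String × List String)) : Decidable (Pre_flatten_and_deduplicate_py categorised) := by unfold Pre_flatten_and_deduplicate_py; infer_instance
def pvWitness_flatten_and_deduplicate_py : (List (String × List String)) :=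
  [("a", [" Cats ", "dogs", "CATS"]), ("b", ["", "Dogs", "birds"])]

def Spec_flatten_and_deduplicate_py (categorised : List (String × List String)) (out : List String) : Prop := out = flatten_and_deduplicate_py_alt categorised
instance (categorised : List (String × List String)) (out : List String) : Decidable (Spec_flatten_and_deduplicate_py categorised out) := by unfold Spec_flatten_and_deduplicate_py; infer_instance

-- ===== CLAIM (what is proved, stated in full; the proofs are below) =====
def Claim_equal_flatten_and_deduplicate_py : Prop := ∀ (categorised : List (String × List String)), Dom_flatten_and_deduplicate_py categorised → Pre_flatten_and_deduplicate_py categorised → Spec_flatten_and_deduplicate_py categorised (flatten_and_deduplicate_py categorised)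

-- ===== LEMMAS AND PROOFS =====

-- First-wins dedup by key, with the set of already-seen keys carried as a list (mirrors A's loop).
def pvDedupF {α κ : Type} [DecidableEq κ] (k : α → κ) : List κ → List α → List α
  | _, [] => []
  | seen, x :: t => if k x ∈ seen then pvDedupF k seen t else x :: pvDedupF k (seen ++ [k x]) t

-- Adjacent-new-key scan (mirrors B's second loop).
def pvScan {α κ : Type} [DecidableEq κ] (k : α → κ) : Option κ → List α → List α
  | _, [] => []
  | prev, x :: t => if some (k x) ≠ prev then x :: pvScan k (some (k x)) t else pvScan k prev t

theorem pvDedupF_congr {α κ : Type} [DecidableEq κ] (k : α → κ) (s₁ s₂ : List κ)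
    (h : ∀ a, a ∈ s₁ ↔ a ∈ s₂) (l : List α) : pvDedupF k s₁ l = pvDedupF k s₂ l := by
  induction l generalizing s₁ s₂ with
  | nil => simp [pvDedupF]
  | cons x t ih =>
    simp only [pvDedupF]
    by_cases hx : k x ∈ s₁
    · rw [if_pos hx, if_pos ((h _).mp hx), ih _ _ h]
    · rw [if_neg hx, if_neg (fun hc => hx ((h _).mpr hc)), ih]
      intro a; simp [List.mem_append, h a]

theorem pvDedupF_mem {α κ : Type} [DecidableEq κ] (k : α → κ) (seen : List κ) (l : List α)
    (y : α) (hy : y ∈ pvDedupF k seen l) : y ∈ l := by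
  induction l generalizing seen with
  | nil => simp [pvDedupF] at hy
  | cons x t ih =>
    simp only [pvDedupF] at hy
    by_cases hk : k x ∈ seen
    · rw [if_pos hk] at hy
      exact List.mem_cons_of_mem _ (ih _ hy)
    · rw [if_neg hk] at hy
      rcases List.mem_cons.mp hy with h | h
      · simp [h]
      · exact List.mem_cons_of_mem _ (ih _ h)

theorem pvInsertBy_all_lt {α κ : Type} [LinearOrder κ] (k : α → κ) (x : α) (zs : List α)
    (h : ∀ z ∈ zs, k x < k z) :
    PySem.List.insertBy (fun a b => decide (k a < k b)) x zs = x :: zs := by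
  cases zs with
  | nil => simp [PySem.List.insertBy]
  | cons z zs => simp [PySem.List.insertBy, h z (List.mem_cons_self ..)]

theorem pvDedupF_insertBy_seen {α κ : Type} [LinearOrder κ] (k : α → κ) (x : α)
    (seen : List κ) (hx : k x ∈ seen) (t : List α) :
    pvDedupF k seen (PySem.List.insertBy (fun a b => decide (k a < k b)) x t) = pvDedupF k seen t := by
  induction t generalizing seen with
  | nil => simp [PySem.List.insertBy, pvDedupF, hx]
  | cons y t ih =>
    simp only [PySem.List.insertBy]
    by_cases hlt : k x < k y
    · rw [if_pos (by simp [hlt])]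
      simp only [pvDedupF, if_pos hx]
    · rw [if_neg (by simp [hlt])]
      simp only [pvDedupF]
      by_cases hy : k y ∈ seen
      · rw [if_pos hy, if_pos hy, ih _ hx]
      · rw [if_neg hy, if_neg hy, ih _ (by simp [List.mem_append, hx])]

theorem pvDedupF_insertBy_dup {α κ : Type} [LinearOrder κ] (k : α → κ) (x : α) (l : List α)
    (hp : l.Pairwise (fun a b => k a ≤ k b)) (hx : k x ∈ l.map k) (seen : List κ) :
    pvDedupF k seen (PySem.List.insertBy (fun a b => decide (k a < k b)) x l) = pvDedupF k seen l := by
  induction l generalizing seen with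
  | nil => simp at hx
  | cons y t ih =>
    rcases List.pairwise_cons.mp hp with ⟨hy2, hp'⟩
    simp only [PySem.List.insertBy]
    by_cases hlt : k x < k y
    · exfalso
      simp only [List.map_cons, List.mem_cons, List.mem_map] at hx
      rcases hx with hx | ⟨z, hz, hzx⟩
      · exact absurd hx (ne_of_lt hlt)
      · have h1 := lt_of_lt_of_le hlt (hy2 z hz)
        rw [hzx] at h1
        exact lt_irrefl _ h1
    · rw [if_neg (by simp [hlt])]
      simp only [pvDedupF]
      by_cases hxt : k x ∈ t.map k
      · by_cases hy : k y ∈ seen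
        · rw [if_pos hy, if_pos hy, ih hp' hxt]
        · rw [if_neg hy, if_neg hy, ih hp' hxt]
      · have hxy : k x = k y := by
          simp only [List.map_cons, List.mem_cons] at hx
          tauto
        by_cases hy : k y ∈ seen
        · rw [if_pos hy, if_pos hy, pvDedupF_insertBy_seen k x seen (hxy ▸ hy) t]
        · rw [if_neg hy, if_neg hy,
            pvDedupF_insertBy_seen k x _ (by simp [List.mem_append, hxy]) t]

theorem pvDedupF_seen_irrel {α κ : Type} [DecidableEq κ] (k : α → κ) (c : κ)
    (seen : List κ) (l : List α) (hc : c ∉ l.map k) :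
    pvDedupF k (seen ++ [c]) l = pvDedupF k seen l := by
  induction l generalizing seen with
  | nil => rfl
  | cons y t ih =>
    have hcy : k y ≠ c := fun h => hc (by simp [h.symm])
    have hct : c ∉ t.map k := fun h => hc (by simp [List.map_cons]; tauto)
    simp only [pvDedupF, List.mem_append, List.mem_singleton, hcy, or_false]
    split
    · exact ih _ hct
    · congr 1
      calc pvDedupF k (seen ++ [c] ++ [k y]) t
          = pvDedupF k (seen ++ [k y] ++ [c]) t := by
            apply pvDedupF_congr
            intro a; simp [List.mem_append]; tauto
        _ = pvDedupF k (seen ++ [k y]) t := ih _ hct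

theorem pvDedupF_insertBy_fresh {α κ : Type} [LinearOrder κ] (k : α → κ) (x : α) (l : List α)
    (hp : l.Pairwise (fun a b => k a ≤ k b)) (hx : k x ∉ l.map k) (seen : List κ)
    (hs : k x ∉ seen) :
    pvDedupF k seen (PySem.List.insertBy (fun a b => decide (k a < k b)) x l)
      = PySem.List.insertBy (fun a b => decide (k a < k b)) x (pvDedupF k seen l) := by
  induction l generalizing seen with
  | nil => simp [PySem.List.insertBy, pvDedupF, hs]
  | cons y t ih =>
    rcases List.pairwise_cons.mp hp with ⟨hy2, hp'⟩
    have hxy : k x ≠ k y := by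
      intro h; exact hx (by simp [h])
    have hxt : k x ∉ t.map k := by
      intro h; exact hx (by simp [List.map_cons]; tauto)
    simp only [PySem.List.insertBy]
    by_cases hlt : k x < k y
    · have hall : ∀ z ∈ pvDedupF k seen (y :: t), k x < k z := by
        intro z hz
        rcases List.mem_cons.mp (pvDedupF_mem k seen _ z hz) with h | h
        · exact h ▸ hlt
        · exact lt_of_lt_of_le hlt (hy2 z h)
      rw [pvInsertBy_all_lt k x _ hall, if_pos (by simp [hlt])]
      simp only [pvDedupF, if_neg hs]
      congr 1
      exact pvDedupF_seen_irrel k (k x) seen _ hx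
    · rw [if_neg (by simp [hlt])]
      simp only [pvDedupF]
      by_cases hy : k y ∈ seen
      · rw [if_pos hy, if_pos hy, ih hp' hxt _ hs]
      · rw [if_neg hy, if_neg hy,
          ih hp' hxt _ (by simp [List.mem_append, hs, hxy])]
        rw [show PySem.List.insertBy (fun a b => decide (k a < k b)) x
              (y :: pvDedupF k (seen ++ [k y]) t)
            = y :: PySem.List.insertBy (fun a b => decide (k a < k b)) x
              (pvDedupF k (seen ++ [k y]) t) by simp [PySem.List.insertBy, hlt]]

theorem pvDedupF_append_singleton {α κ : Type} [DecidableEq κ] (k : α → κ) (x : α)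
    (l : List α) (seen : List κ) :
    pvDedupF k seen (l ++ [x])
      = if k x ∈ seen ∨ k x ∈ l.map k then pvDedupF k seen l else pvDedupF k seen l ++ [x] := by
  induction l generalizing seen with
  | nil => simp [pvDedupF]
  | cons y t ih =>
    simp only [List.cons_append, pvDedupF]
    by_cases hy : k y ∈ seen
    · rw [if_pos hy, if_pos hy, ih]
      have h1 : (k x ∈ seen ∨ k x ∈ (y :: t).map k) ↔ (k x ∈ seen ∨ k x ∈ t.map k) := by
        simp only [List.map_cons, List.mem_cons]
        constructor
        · rintro (h | h | h)
          exacts [Or.inl h, Or.inl (h ▸ hy), Or.inr h]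
        · rintro (h | h)
          exacts [Or.inl h, Or.inr (Or.inr h)]
      rw [if_congr h1 rfl rfl]
    · rw [if_neg hy, if_neg hy, ih]
      have h2 : ((y :: pvDedupF k (seen ++ [k y]) t) ++ [x])
          = y :: (pvDedupF k (seen ++ [k y]) t ++ [x]) := by simp
      rw [h2, ← apply_ite (fun l => y :: l)]
      congr 1
      have h1 : (k x ∈ seen ∨ k x ∈ (y :: t).map k)
          ↔ (k x ∈ seen ++ [k y] ∨ k x ∈ t.map k) := by
        simp only [List.map_cons, List.mem_cons, List.mem_append]
        tauto
      rw [if_congr h1 rfl rfl]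

theorem pvSorted_append_singleton {α κ : Type} [LinearOrder κ] (k : α → κ) (l : List α) (x : α) :
    PySem.List.sorted (l ++ [x]) k false
      = PySem.List.insertBy (fun a b => decide (k a < k b)) x (PySem.List.sorted l k false) := by
  rw [PySem.List.sorted_eq_foldl_insertBy, PySem.List.sorted_eq_foldl_insertBy, List.foldl_append]
  simp [List.foldl]

theorem pvScan_eq_dedupF_aux {α κ : Type} [LinearOrder κ] (k : α → κ) (l : List α)
    (hp : l.Pairwise (fun a b => k a ≤ k b)) (seen : List κ) (v : κ)
    (hmax : ∀ s ∈ seen, s ≤ v) (hv : v ∈ seen) (hlb : ∀ y ∈ l, v ≤ k y) :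
    pvScan k (some v) l = pvDedupF k seen l := by
  induction l generalizing seen v with
  | nil => simp [pvScan, pvDedupF]
  | cons y t ih =>
    rcases List.pairwise_cons.mp hp with ⟨hy2, hp'⟩
    simp only [pvScan, pvDedupF]
    by_cases he : k y = v
    · rw [if_neg (by simp [he]), if_pos (he ▸ hv)]
      exact ih hp' seen v hmax hv (fun y' hy' => he ▸ hy2 y' hy')
    · have hvy : v < k y := lt_of_le_of_ne (hlb y (List.mem_cons_self ..)) (Ne.symm he)
      rw [if_pos (by simp [he]), if_neg (fun hc => absurd (hmax _ hc) (not_le.mpr hvy))]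
      congr 1
      exact ih hp' (seen ++ [k y]) (k y)
        (by intro s hs
            rcases List.mem_append.mp hs with h | h
            · exact le_of_lt (lt_of_le_of_lt (hmax s h) hvy)
            · simp at h; simp [h])
        (by simp) hy2

theorem pvScan_eq_dedupF {α κ : Type} [LinearOrder κ] (k : α → κ) (l : List α)
    (hp : l.Pairwise (fun a b => k a ≤ k b)) : pvScan k none l = pvDedupF k [] l := by
  cases l with
  | nil => rfl
  | cons y t =>
    rcases List.pairwise_cons.mp hp with ⟨hy2, hp'⟩
    simp only [pvScan, pvDedupF, if_pos (by simp : some (k y) ≠ none),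
      if_neg (List.not_mem_nil)]
    congr 1
    exact pvScan_eq_dedupF_aux k t hp' [k y] (k y) (by simp) (by simp) hy2

-- the crux: first-wins dedup commutes with the stable sort
theorem pvSorted_dedupF_comm {α κ : Type} [LinearOrder κ] (k : α → κ) (l : List α) :
    PySem.List.sorted (pvDedupF k [] l) k false = pvDedupF k [] (PySem.List.sorted l k false) := by
  induction l using List.reverseRecOn with
  | nil => rfl
  | append_singleton l x ih =>
    have hperm : ∀ a, a ∈ (PySem.List.sorted l k false).map k ↔ a ∈ l.map k :=
      fun a => ((PySem.List.sorted_perm l k false).map k).mem_iff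
    rw [pvSorted_append_singleton, pvDedupF_append_singleton]
    by_cases hx : k x ∈ l.map k
    · rw [if_pos (Or.inr hx), ih,
        pvDedupF_insertBy_dup k x _ (PySem.List.sorted_pairwise l k) ((hperm _).mpr hx)]
    · rw [if_neg (by simp [hx]), pvSorted_append_singleton, ih,
        pvDedupF_insertBy_fresh k x _ (PySem.List.sorted_pairwise l k)
          (fun hc => hx ((hperm _).mp hc)) [] (List.not_mem_nil)]

theorem pvLower_eq_empty_iff (s : String) : PySem.Str.lower s = "" ↔ s = "" := by
  simp [PySem.Str.lower, PySem.Chars.lower]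

theorem pvFoldl_pairs {σ : Type} (g : σ → String → σ) (cs : List (String × List String)) (init : σ) :
    cs.foldl (fun st p => p.2.foldl g st) init = (cs.flatMap (fun p => p.2)).foldl g init := by
  induction cs generalizing init with
  | nil => rfl
  | cons c cs ih => simp [List.flatMap_cons, List.foldl_append, ih]

theorem pvLoopA_eq (kws : List String) (seen : PySem.Set String) (acc : List String) :
    (kws.foldl (fun (st : PySem.Set String × List String) kw =>
      let normalised := PySem.Str.lower (PySem.Str.strip kw)
      if (!(normalised == "")) && (!(PySem.Set.contains st.1 normalised)) then
        (PySem.Set.add st.1 normalised, st.2 ++ [PySem.Str.strip kw])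
      else st) (seen, acc)).2
    = acc ++ pvDedupF (fun s => PySem.Str.lower s) seen
        ((kws.map PySem.Str.strip).filter (fun s => s ≠ "")) := by
  induction kws generalizing seen acc with
  | nil => simp [pvDedupF]
  | cons kw t ih =>
    simp only [List.foldl_cons, List.map_cons]
    by_cases hs : PySem.Str.strip kw = ""
    · simp only [List.filter_cons, hs]
      simp only [ne_eq, not_true_eq_false, decide_false, Bool.false_eq_true, if_false]
      simpa using ih seen acc
    · have hn : ¬ PySem.Str.lower (PySem.Str.strip kw) = "" :=
        fun hc => hs ((pvLower_eq_empty_iff _).mp hc)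
      simp only [List.filter_cons, ne_eq, hs, not_false_eq_true, decide_true, if_true,
        pvDedupF]
      by_cases hc : PySem.Str.lower (PySem.Str.strip kw) ∈ (seen : List String)
      · have : PySem.Set.contains seen (PySem.Str.lower (PySem.Str.strip kw)) = true := by
          simp [PySem.Set.contains, hc]
        simp only [this, Bool.not_true, Bool.and_false, if_pos hc]
        exact ih seen acc
      · have hcb : PySem.Set.contains seen (PySem.Str.lower (PySem.Str.strip kw)) = false := by
          simp [PySem.Set.contains, hc]
        simp only [hcb, Bool.not_false, Bool.and_true, if_neg hc,
          PySem.Set.add_of_not_mem hc]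
        have hb : (!(PySem.Str.lower (PySem.Str.strip kw) == "")) = true := by simp [hn]
        rw [hb, if_pos rfl]
        rw [ih (seen ++ [PySem.Str.lower (PySem.Str.strip kw)]) (acc ++ [PySem.Str.strip kw])]
        simp

theorem pvLoopB_eq (kws : List String) (acc : List String) :
    kws.foldl (fun (acc : List String) kw =>
      let stripped := PySem.Str.strip kw
      if !(stripped == "") then acc ++ [stripped] else acc) acc
    = acc ++ (kws.map PySem.Str.strip).filter (fun s => s ≠ "") := by
  induction kws generalizing acc with
  | nil => simp
  | cons kw t ih =>
    simp only [List.foldl_cons, List.map_cons, List.filter_cons]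
    by_cases hs : PySem.Str.strip kw = ""
    · simp only [hs, beq_self_eq_true, Bool.not_true, if_false, ne_eq, not_true_eq_false,
        decide_false, Bool.false_eq_true]
      simpa using ih acc
    · simp only [ne_eq, hs, not_false_eq_true, decide_true, if_true]
      have : (!(PySem.Str.strip kw == "")) = true := by simp [hs]
      rw [this, if_pos rfl, ih (acc ++ [PySem.Str.strip kw])]
      simp

theorem pvLoopScan_eq (ys : List String) (prev : Option String) (acc : List String) :
    (ys.foldl (fun (st : Option String × List String) kw =>
      let low := PySem.Str.lower kw
      if some low ≠ st.1 then (some low, st.2 ++ [kw]) else st) (prev, acc)).2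
    = acc ++ pvScan (fun s => PySem.Str.lower s) prev ys := by
  induction ys generalizing prev acc with
  | nil => simp [pvScan]
  | cons y t ih =>
    simp only [List.foldl_cons, pvScan]
    by_cases hp : some (PySem.Str.lower y) ≠ prev
    · rw [if_pos hp, if_pos hp, ih]
      simp
    · rw [if_neg hp, if_neg hp, ih]

-- ===== VERDICT (by name: the statement is the Claim_ definition above) =====
theorem flatten_and_deduplicate_py_spec : Claim_equal_flatten_and_deduplicate_py := by
  intro categorised _ _
  unfold Spec_flatten_and_deduplicate_py flatten_and_deduplicate_py flatten_and_deduplicate_py_alt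
  simp only
  rw [pvFoldl_pairs, pvFoldl_pairs, pvLoopA_eq, pvLoopB_eq, pvLoopScan_eq]
  simp only [List.nil_append]
  rw [pvScan_eq_dedupF _ _ (PySem.List.sorted_pairwise _ _), ← pvSorted_dedupF_comm]
  rfl
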